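-- pv_equiv track=rewrite | github.com/zyf0717/chess-lab | apps/shiny/app.py | move_rows
-- ===== SOURCE A (Python) =====
-- def move_rows(sans: list[str]) -> list[tuple[int, str, str]]:
--     rows = []
--     for idx in range(0, len(sans), 2):
--         move_no = idx // 2 + 1
--         white = sans[idx]
--         black = sans[idx + 1] if idx + 1 < len(sans) else ""
--         rows.append((move_no, white, black))
--     return rows
-- ===== SOURCE B (Python) =====
-- def move_rows(sans: list[str]) -> list[tuple[int, str, str]]:
--     # Iterator-based pairing: pull two SAN moves at a time from one iterator,
--     # counting rows as we go -- no index arithmetic.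
--     it = iter(sans)
--     out = []
--     n = 0
--     for w in it:
--         n += 1
--         out.append((n, w, next(it, "")))
--     return out
-- ===== Notes on version B (the rewrite author's own statement) =====
-- stated objective: idiomatic
-- what changed: Replaces the stepped index loop (range(0,len,2) with idx//2+1 numbering and bounds-checked lookahead) by a single iterator consumed two elements at a time with a running row counter and next(it, "") for the missing black move.
import Mathlib
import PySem

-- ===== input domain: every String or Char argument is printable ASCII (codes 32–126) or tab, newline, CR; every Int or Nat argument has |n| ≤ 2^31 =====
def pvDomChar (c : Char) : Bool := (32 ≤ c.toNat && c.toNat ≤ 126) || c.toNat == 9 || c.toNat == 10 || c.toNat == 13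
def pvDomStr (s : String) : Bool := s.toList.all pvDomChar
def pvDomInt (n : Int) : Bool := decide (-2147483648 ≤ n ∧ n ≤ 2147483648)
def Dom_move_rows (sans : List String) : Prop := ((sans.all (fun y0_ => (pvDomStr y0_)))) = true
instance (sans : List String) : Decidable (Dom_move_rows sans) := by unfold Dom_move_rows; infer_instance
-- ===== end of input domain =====

-- B replaces A's stepped index loop by one iterator consumed two moves at a time (idiomatic; same cost).

-- ===== PORT A =====
-- indices idx and idx+1 are always in range when read, so pyGetD's default is never used
def move_rows (sans : List String) : List (Int × String × String) :=
  (PySem.List.pyRange 0 (PySem.List.len sans) 2).foldl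
    (fun rows idx =>
      let move_no := PySem.Int.floordiv idx 2 + 1
      let white := PySem.List.pyGetD sans idx ""
      let black := if idx + 1 < PySem.List.len sans then PySem.List.pyGetD sans (idx + 1) "" else ""
      rows ++ [(move_no, white, black)]) []

-- ===== PORT B =====
-- the Python 'for w in it' pulling a second element with next(it, "") = recursion taking two list cells per step
def mrLoop : List String → Int → List (Int × String × String) → List (Int × String × String)
  | [], _, out => out
  | [w], n, out => out ++ [(n + 1, w, "")]
  | w :: b :: rest, n, out => mrLoop rest (n + 1) (out ++ [(n + 1, w, b)])

def move_rows_alt (sans : List String) : List (Int × String × String) :=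
  mrLoop sans 0 []

-- ===== PRECONDITION & SPEC =====
def Spec_move_rows (sans : List String) (out : List (Int × String × String)) : Prop := out = move_rows_alt sans
instance (sans : List String) (out : List (Int × String × String)) : Decidable (Spec_move_rows sans out) := by unfold Spec_move_rows; infer_instance

-- ===== CLAIM (what is proved, stated in full; the proofs are below) =====
def Claim_equal_move_rows : Prop := ∀ (sans : List String), Dom_move_rows sans → Spec_move_rows sans (move_rows sans)

-- ===== LEMMAS AND PROOFS =====

lemma pyRange_two_nil (a b : Int) (h : b ≤ a) : PySem.List.pyRange a b 2 = [] := by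
  rw [PySem.List.pyRange_of_pos a b (by norm_num)]
  simp [show ¬ a < b by omega]

lemma pyRange_two_cons (a b : Int) (h : a < b) :
    PySem.List.pyRange a b 2 = a :: PySem.List.pyRange (a + 2) b 2 := by
  rw [PySem.List.pyRange_of_pos a b (by norm_num),
      PySem.List.pyRange_of_pos (a + 2) b (by norm_num)]
  by_cases h2 : a + 2 < b
  · have hn : ((b - a + 2 - 1) / 2).toNat = ((b - (a + 2) + 2 - 1) / 2).toNat + 1 := by omega
    simp only [if_pos h, if_pos h2, hn, List.range_succ_eq_map, List.map_cons, List.map_map]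
    congr 1
    · push_cast; ring
    · apply List.map_congr_left
      intro k _
      simp only [Function.comp_apply]
      push_cast; ring
  · have hn : ((b - a + 2 - 1) / 2).toNat = 1 := by omega
    simp [if_pos h, if_neg h2, hn, List.range_succ]

lemma loopA (sans : List String) : ∀ (k : Nat) (acc : List (Int × String × String)),
    (PySem.List.pyRange (2 * (k : Int)) (PySem.List.len sans) 2).foldl
      (fun rows idx =>
        rows ++ [(PySem.Int.floordiv idx 2 + 1,
          PySem.List.pyGetD sans idx "",
          if idx + 1 < PySem.List.len sans then PySem.List.pyGetD sans (idx + 1) "" else "")]) acc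
      = mrLoop (sans.drop (2 * k)) (k : Int) acc := by
  intro k acc
  induction hm : sans.length - 2 * k using Nat.strong_induction_on generalizing k acc with
  | _ m ih =>
  by_cases hk : sans.length ≤ 2 * k
  · rw [pyRange_two_nil _ _ (by simp [PySem.List.len]; omega),
        List.drop_eq_nil_of_le hk]
    rfl
  · push_neg at hk
    rw [pyRange_two_cons _ _ (by simp [PySem.List.len]; omega)]
    obtain ⟨w, rest, hdrop⟩ : ∃ w rest, sans.drop (2 * k) = w :: rest := by
      cases hd : sans.drop (2 * k) with
      | nil => exfalso; have := List.drop_eq_nil_iff.mp hd; omega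
      | cons w rest => exact ⟨w, rest, rfl⟩
    have hw : PySem.List.pyGetD sans (2 * (k : Int)) "" = w := by
      have h0 : sans[2 * k]? = some w := by
        have h := @List.getElem?_drop _ sans (2 * k) 0
        simp [hdrop] at h
        exact h.symm
      rw [PySem.List.pyGetD_of_nonneg _ _ (by positivity),
          show ((2 : Int) * (k : Int)).toNat = 2 * k by omega,
          List.getD_eq_getElem?_getD, h0]
      rfl
    have hfd : PySem.Int.floordiv (2 * (k : Int)) 2 + 1 = (k : Int) + 1 := by
      simp [PySem.Int.floordiv]
    simp only [List.foldl_cons, hfd, hw]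
    cases hrest : rest with
    | nil =>
      have hlen : sans.length = 2 * k + 1 := by
        have := congrArg List.length hdrop
        simp [hrest] at this; omega
      have hnb : ¬ (2 * (k : Int) + 1 < PySem.List.len sans) := by
        simp [PySem.List.len]; omega
      rw [show (2 * (k : Int) + 2) = 2 * ((k + 1 : Nat) : Int) by push_cast; ring,
          ih (sans.length - 2 * (k + 1)) (by omega) (k + 1) _ rfl,
          List.drop_eq_nil_of_le (by omega), if_neg hnb]
      simp only [mrLoop, hdrop, hrest]
    | cons b rest' =>
      have hlen : 2 * k + 1 < sans.length := by
        have := congrArg List.length hdrop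
        simp [hrest] at this; omega
      have hb : PySem.List.pyGetD sans (2 * (k : Int) + 1) "" = b := by
        have h0 : sans[2 * k + 1]? = some b := by
          have h := @List.getElem?_drop _ sans (2 * k) 1
          simp [hdrop, hrest] at h
          exact h.symm
        rw [PySem.List.pyGetD_of_nonneg _ _ (by positivity),
            show ((2 : Int) * (k : Int) + 1).toNat = 2 * k + 1 by omega,
            List.getD_eq_getElem?_getD, h0]
        rfl
      have hyb : (2 * (k : Int) + 1 < PySem.List.len sans) := by
        simp [PySem.List.len]; omega
      have hdrop2 : sans.drop (2 * (k + 1)) = rest' := by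
        have h2 : sans.drop (2 * k + 2) = (sans.drop (2 * k)).drop 2 := by
          rw [List.drop_drop]
        rw [show 2 * (k + 1) = 2 * k + 2 by ring, h2, hdrop, hrest]
        rfl
      rw [show (2 * (k : Int) + 2) = 2 * ((k + 1 : Nat) : Int) by push_cast; ring,
          ih (sans.length - 2 * (k + 1)) (by omega) (k + 1) _ rfl,
          hdrop2, if_pos hyb, hb]
      simp only [mrLoop, hdrop, hrest]
      push_cast
      ring_nf

-- ===== VERDICT (by name: the statement is the Claim_ definition above) =====
theorem move_rows_spec : Claim_equal_move_rows := by
  intro sans _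
  unfold Spec_move_rows move_rows move_rows_alt
  have := loopA sans 0 []
  simpa using this
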